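-- pv_equiv track=rewrite | github.com/Douglas571/advent_of_code | 04/bingo.py | trunkated_bingo_game
-- ===== SOURCE A (Python) =====
-- from collections import deque
--
-- def check_rows(board, market_numbers):
--   for i, row in enumerate(board):
--     if all(n in market_numbers for n in row):
--       return row, i + 1
--
--   return [], None
--
-- def check_cols(board, market_numbers):
--   cols = [ [] for _ in range(len(board[0]))]
--   for i, row in enumerate(board):
--     for j, n in enumerate(row):
--       cols[j].append(n)
--
--   for i, col in enumerate(cols):
--     if all(n in market_numbers for n in col):
--       return col, i + 1
--
--   return [], None
--
-- def get_unmarket_numbers(board, market_numbers):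
--   unmarket_numbers = []
--
--   for row in board:
--     for n in row:
--       if not n in market_numbers:
--         unmarket_numbers.append(n)
--
--   return unmarket_numbers
--
-- def trunkated_bingo_game(numbers, boards):
--   numbers_copy = deque(numbers[:])
--   market_numbers = []
--   winners_ranking = []
--   winners = []
--
--   while len(numbers_copy) > 0:
--     n = numbers_copy.popleft()
--     market_numbers.append(n)
--
--     for i, board in enumerate(boards):
--       if i in winners: continue
--
--       row, r = check_rows(board, market_numbers)
--       col, c = check_cols(board, market_numbers)
--
--       if r or c:
--         winners.append(i)
--
--         unmarket_numbers = get_unmarket_numbers(board, market_numbers)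
--         sum_unmarket_numbers = sum(unmarket_numbers)
--
--         score = sum_unmarket_numbers * n
--
--         winners_ranking.append(
--           {
--             "board": i+1,
--             "score": score
--           }
--         )
--
--   return winners_ranking
-- ===== SOURCE B (Python) =====
-- def trunkated_bingo_game(numbers, boards):
--   # Closed form: rank boards by the first draw completing a line; no per-draw re-simulation.
--   if not numbers:
--     return []
--   INF = len(numbers)
--   first = {}
--   for t, n in enumerate(numbers):
--     if n not in first:
--       first[n] = t
--   buckets = [[] for _ in numbers]
--   for i, board in enumerate(boards):
--     cols = [[] for _ in range(len(board[0]))]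
--     for row in board:
--       for j, n in enumerate(row):
--         cols[j].append(n)
--     wt = min((max((first.get(n, INF) for n in line), default=-1)
--               for line in board + cols), default=INF)
--     if wt < INF:
--       t = max(wt, 0)
--       score = sum(n for row in board for n in row if first.get(n, INF) > t)
--       buckets[t].append({"board": i + 1, "score": score * numbers[t]})
--   return [e for b in buckets for e in b]
-- ===== Notes on version B (the rewrite author's own statement) =====
-- stated objective: faster
-- what changed: Instead of re-simulating the game after every draw (re-scanning every row and column of every not-yet-winning board against the growing drawn-number list), B computes each number's first-draw index once, derives each board's winning draw in closed form as min over its lines of max over cells of those indices, and emits the ranking bucketed by winning draw.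
import Mathlib
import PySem

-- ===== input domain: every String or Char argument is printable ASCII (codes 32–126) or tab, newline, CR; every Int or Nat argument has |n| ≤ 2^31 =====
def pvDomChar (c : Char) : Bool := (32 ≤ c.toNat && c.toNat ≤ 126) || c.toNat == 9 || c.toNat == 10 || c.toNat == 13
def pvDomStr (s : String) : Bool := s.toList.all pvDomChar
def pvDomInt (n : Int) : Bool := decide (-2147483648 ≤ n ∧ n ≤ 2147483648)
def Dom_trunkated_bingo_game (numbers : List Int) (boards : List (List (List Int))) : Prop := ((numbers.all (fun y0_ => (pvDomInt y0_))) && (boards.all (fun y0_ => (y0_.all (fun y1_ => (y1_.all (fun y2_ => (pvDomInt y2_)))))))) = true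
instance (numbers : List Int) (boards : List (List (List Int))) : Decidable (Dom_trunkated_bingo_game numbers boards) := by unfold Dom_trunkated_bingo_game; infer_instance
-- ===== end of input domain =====

-- B replaces A's per-draw re-simulation by a closed form (first-occurrence draw indices; a board's
-- winning draw = min over its lines of max over cells), bucketed by winning draw; objective: faster.

-- ===== PORT A =====
-- the scan 'for i, line in enumerate(lines): if all(n in market for n in line): return line, i+1'
-- (the whole of check_rows, and the second loop of check_cols)
def scanLinesA (ls : List (List Int)) (market : List Int) (i : Int) : List Int × Option Int :=
  match ls with
  | [] => ([], none)
  | line :: rest =>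
    if line.all (fun n => market.contains n) then (line, some (i + 1))
    else scanLinesA rest market (i + 1)

-- 'for j, n in enumerate(row): cols[j].append(n)' — appends row's entries to successive columns;
-- a row longer than cols is Python's IndexError, excluded by Pre_ whenever this code is reached
def appendRowA (cols : List (List Int)) (row : List Int) : List (List Int) :=
  match cols, row with
  | cols, [] => cols
  | [], _ :: _ => []        -- Python raises IndexError here; unreachable under Pre_
  | c :: cs, n :: ns => (c ++ [n]) :: appendRowA cs ns

def checkColsA (board : List (List Int)) (market : List Int) : List Int × Option Int :=
  -- len(board[0]): an empty board raises IndexError, excluded by Pre_ whenever this is reached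
  let cols := board.foldl appendRowA (List.replicate (board.headD []).length [])
  scanLinesA cols market 0

def getUnmarketA (board : List (List Int)) (market : List Int) : List Int :=
  board.foldl (fun acc row =>
    row.foldl (fun acc n => if market.contains n then acc else acc ++ [n]) acc) []

-- body of 'for i, board in enumerate(boards)'; 'if r or c' is r.isSome || c.isSome exactly:
-- r/c are None or i+1 ≥ 1 (never a falsy 0)
def stepBoardA (market : List Int) (n : Int) (st2 : List Int × List (List (String × Int)))
    (ib : Int × List (List Int)) : List Int × List (List (String × Int)) :=
  if st2.1.contains ib.1 then st2
  else
    let rc := scanLinesA ib.2 market 0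
    let cc := checkColsA ib.2 market
    if rc.2.isSome || cc.2.isSome then
      let score := (getUnmarketA ib.2 market).sum * n
      (st2.1 ++ [ib.1], st2.2 ++ [[("board", ib.1 + 1), ("score", score)]])
    else st2

-- body of 'while len(numbers_copy) > 0' (one draw)
def stepDrawA (boards : List (List (List Int)))
    (st : List Int × List Int × List (List (String × Int))) (n : Int) :
    List Int × List Int × List (List (String × Int)) :=
  let market := st.1 ++ [n]
  let inner := (PySem.List.enumerate boards 0).foldl (stepBoardA market n) (st.2.1, st.2.2)
  (market, inner.1, inner.2)

def trunkated_bingo_game (numbers : List Int) (boards : List (List (List Int))) : List (List (String × Int)) :=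
  (numbers.foldl (stepDrawA boards) ([], [], [])).2.2

-- ===== PORT B =====
-- 'first.setdefault'-style loop: first draw index of each number
def firstIdxB (numbers : List Int) : PySem.Dict Int Int :=
  (PySem.List.enumerate numbers 0).foldl
    (fun d tn => if d.contains tn.2 then d else d.insert tn.2 tn.1) PySem.Dict.empty

-- body of 'for i, board in enumerate(boards)': closed-form winning draw, then bucket the entry;
-- the column-building loop is the same transpose loop as A's check_cols (same helper appendRowA),
-- so it has the same IndexError behaviour, excluded by Pre_
def stepBoardB (numbers : List Int) (first : PySem.Dict Int Int)
    (bks : List (List (List (String × Int)))) (ib : Int × List (List Int)) :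
    List (List (List (String × Int))) :=
  let INF : Int := numbers.length
  let board := ib.2
  let cols := board.foldl appendRowA (List.replicate (board.headD []).length [])
  -- min((max((first.get(n, INF) for n in line), default=-1) for line in board+cols), default=INF)
  -- ported as the running min/max folds these generator expressions compute
  let wt := (board ++ cols).foldl
    (fun m line => min m (line.foldl (fun mx n => max mx (first.getD n INF)) (-1))) INF
  if wt < INF then
    let t := max wt 0
    let score := (((board.flatMap id).filter (fun n => t < first.getD n INF)).sum)
                  * PySem.List.pyGetD numbers t 0    -- numbers[t]; 0 ≤ t < len numbers here
    -- buckets[t].append(…)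
    PySem.List.pySetD bks t ((PySem.List.pyGetD bks t []) ++ [[("board", ib.1 + 1), ("score", score)]])
  else bks

def trunkated_bingo_game_alt (numbers : List Int) (boards : List (List (List Int))) : List (List (String × Int)) :=
  if numbers = [] then []        -- 'if not numbers: return []' — no draws, nobody wins
  else
    let first := firstIdxB numbers
    let buckets := (PySem.List.enumerate boards 0).foldl (stepBoardB numbers first)
      (numbers.map (fun _ => []))
    buckets.flatten

-- ===== PRECONDITION & SPEC =====
-- Pre_ excludes exactly the inputs on which A raises IndexError: a non-empty draw list together
-- with a board that is empty or has a row longer than its first row (check_cols indexes past cols).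
def Pre_trunkated_bingo_game (numbers : List Int) (boards : List (List (List Int))) : Prop :=
  numbers = [] ∨ ∀ b ∈ boards, b ≠ [] ∧ ∀ row ∈ b, row.length ≤ (b.headD []).length
instance (numbers : List Int) (boards : List (List (List Int))) : Decidable (Pre_trunkated_bingo_game numbers boards) := by unfold Pre_trunkated_bingo_game; infer_instance

def pvWitness_trunkated_bingo_game : List Int × List (List (List Int)) :=
  ([1, 2, 3, 4], [[[1, 2], [3, 4]], [[2, 4], [1, 9]]])

def Spec_trunkated_bingo_game (numbers : List Int) (boards : List (List (List Int))) (out : List (List (String × Int))) : Prop := out = trunkated_bingo_game_alt numbers boards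
instance (numbers : List Int) (boards : List (List (List Int))) (out : List (List (String × Int))) : Decidable (Spec_trunkated_bingo_game numbers boards out) := by unfold Spec_trunkated_bingo_game; infer_instance

-- ===== CLAIM (what is proved, stated in full; the proofs are below) =====
def Claim_equal_trunkated_bingo_game : Prop := ∀ (numbers : List Int) (boards : List (List (List Int))), Dom_trunkated_bingo_game numbers boards → Pre_trunkated_bingo_game numbers boards → Spec_trunkated_bingo_game numbers boards (trunkated_bingo_game numbers boards)

-- ===== LEMMAS AND PROOFS =====

-- first-occurrence draw index of n in numbers (numbers.length if n is never drawn)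
def fIdx (numbers : List Int) (n : Int) : Nat := (numbers.idxOf? n).getD numbers.length

def goodB (b : List (List Int)) : Prop := b ≠ [] ∧ ∀ row ∈ b, row.length ≤ (b.headD []).length

def colsOf (board : List (List Int)) : List (List Int) :=
  (List.range (board.headD []).length).map (fun j => board.filterMap (fun row => row[j]?))

-- completion draw index of a line (-1 if empty, numbers.length if it never completes)
def lineT (numbers : List Int) (line : List Int) : Int :=
  line.foldl (fun mx n => max mx ((fIdx numbers n : Int))) (-1)

-- raw winning draw of a board
def wtOf (numbers : List Int) (board : List (List Int)) : Int :=
  (board ++ colsOf board).foldl (fun m l => min m (lineT numbers l)) (numbers.length : Int)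

-- registered winning draw (a board complete before any draw is registered at draw 0)
def regOf (numbers : List Int) (board : List (List Int)) : Int := max (wtOf numbers board) 0

def scoreOf (numbers : List Int) (board : List (List Int)) : Int :=
  ((board.flatMap id).filter (fun n => regOf numbers board < (fIdx numbers n : Int))).sum
    * numbers.getD (regOf numbers board).toNat 0

def entryOf (numbers : List Int) (i : Int) (board : List (List Int)) : List (String × Int) :=
  [("board", i + 1), ("score", scoreOf numbers board)]

-- the winners registered at draw t, in board order
def groupAt (numbers : List Int) (boards : List (List (List Int))) (t : Nat) : List (List (String × Int)) :=
  ((PySem.List.enumerate boards 0).filter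
    (fun ib => decide (wtOf numbers ib.2 < (numbers.length : Int) ∧ regOf numbers ib.2 = (t : Int)))).map
    (fun ib => entryOf numbers ib.1 ib.2)

lemma firstFold_getD (xs : List Int) (s : Int) (d : PySem.Dict Int Int) (n v : Int) :
    ((PySem.List.enumerate xs s).foldl
      (fun d tn => if d.contains tn.2 then d else d.insert tn.2 tn.1) d).getD n v
    = if d.contains n then d.getD n v
      else match xs.idxOf? n with | some k => s + k | none => v := by
  induction xs generalizing s d with
  | nil =>
    simp only [PySem.List.enumerate_nil, List.foldl_nil, List.idxOf?_nil]
    split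
    · rfl
    · next h => exact PySem.Dict.getD_of_not_contains d v (Bool.not_eq_true _ ▸ eq_false_of_ne_true h)
  | cons x xs ih =>
    rw [PySem.List.enumerate_cons]
    simp only [List.foldl_cons, List.idxOf?_cons]
    by_cases hc : d.contains x
    · rw [if_pos hc, ih]
      by_cases hn : d.contains n
      · simp [hn]
      · have hxn : (x == n) = false := by
          simp only [beq_eq_false_iff_ne, ne_eq]
          rintro rfl; rw [hc] at hn; exact hn rfl
        simp only [hn, Bool.false_eq_true, if_false, hxn]
        cases h : xs.idxOf? n <;> simp [h] <;> ring
    · rw [if_neg hc, ih]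
      by_cases hxn : x = n
      · subst hxn
        rw [if_pos (by rw [PySem.Dict.contains_insert]; simp)]
        rw [if_neg (by simp [hc]), if_pos (by simp)]
        simp [PySem.Dict.getD_insert_self]
      · rw [PySem.Dict.contains_insert]
        have hne : (n == x) = false := by simp only [beq_eq_false_iff_ne, ne_eq]; exact fun h => hxn h.symm
        have hne' : (x == n) = false := by simp only [beq_eq_false_iff_ne, ne_eq]; exact hxn
        rw [hne]
        simp only [Bool.false_or, hne', Bool.false_eq_true, if_false]
        rw [PySem.Dict.getD_insert_of_ne _ _ _ (fun h => hxn h.symm)]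
        by_cases hn : d.contains n
        · simp [hn]
        · simp only [hn, Bool.false_eq_true, if_false]
          cases h : xs.idxOf? n <;> simp [h] <;> ring

lemma first_getD (xs : List Int) (n : Int) :
    (firstIdxB xs).getD n (xs.length : Int) = (fIdx xs n : Int) := by
  unfold firstIdxB
  rw [firstFold_getD]
  simp only [PySem.Dict.contains_empty, Bool.false_eq_true, if_false, fIdx]
  cases h : xs.idxOf? n <;> simp [h]

lemma mem_take_iff_fIdx (xs : List Int) (n : Int) (k : Nat) (hk : k ≤ xs.length) :
    n ∈ xs.take k ↔ fIdx xs n < k := by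
  induction xs generalizing k with
  | nil => simp at hk; subst hk; simp
  | cons x xs ih =>
    cases k with
    | zero => simp
    | succ k =>
      simp only [List.take_succ_cons, List.mem_cons, fIdx, List.idxOf?_cons]
      by_cases hxn : x = n
      · subst hxn; simp
      · have : (x == n) = false := by simp [hxn]
        simp only [this, Bool.false_eq_true, if_false]
        rw [or_iff_right (fun h => hxn h.symm)]
        rw [ih k (by simpa using hk)]
        simp only [fIdx]
        cases h : xs.idxOf? n <;> simp [h] <;> omega

lemma lineT_le_iff (numbers : List Int) (line : List Int) (t : Int) (h : -1 ≤ t) :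
    lineT numbers line ≤ t ↔ ∀ n ∈ line, (fIdx numbers n : Int) ≤ t := by
  unfold lineT
  rw [show line.foldl (fun mx n => max mx ((fIdx numbers n : Int))) (-1)
      = (line.map (fun n => (fIdx numbers n : Int))).foldl max (-1) from List.foldl_map.symm]
  constructor
  · intro hle n hn
    exact le_trans ((PySem.List.le_foldl_max _ _).2 _ (List.mem_map_of_mem (f := fun n => (fIdx numbers n : Int)) hn)) hle
  · intro hall
    rcases PySem.List.foldl_max_mem (line.map (fun n => (fIdx numbers n : Int))) (-1) with heq | hmem
    · rw [heq]; exact h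
    · rcases List.mem_map.mp hmem with ⟨n, hn, hv⟩
      rw [← hv]; exact hall n hn

lemma wt_le_iff (numbers : List Int) (board : List (List Int)) (t : Int)
    (ht : t < (numbers.length : Int)) :
    wtOf numbers board ≤ t ↔ ∃ l ∈ board ++ colsOf board, lineT numbers l ≤ t := by
  unfold wtOf
  rw [show (board ++ colsOf board).foldl (fun m l => min m (lineT numbers l)) (numbers.length : Int)
      = ((board ++ colsOf board).map (lineT numbers)).foldl min (numbers.length : Int) from List.foldl_map.symm]
  constructor
  · intro hle
    rcases PySem.List.foldl_min_mem ((board ++ colsOf board).map (lineT numbers)) (numbers.length : Int) with heq | hmem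
    · rw [heq] at hle; omega
    · rcases List.mem_map.mp hmem with ⟨l, hl, hv⟩
      exact ⟨l, hl, by rw [hv]; exact hle⟩
  · rintro ⟨l, hl, hlt⟩
    exact le_trans ((PySem.List.foldl_min_le _ _).2 _ (List.mem_map_of_mem (f := lineT numbers) hl)) hlt

lemma scanLines_isSome (ls : List (List Int)) (market : List Int) (i : Int) :
    (scanLinesA ls market i).2.isSome = ls.any (fun l => l.all (fun n => market.contains n)) := by
  induction ls generalizing i with
  | nil => simp [scanLinesA]
  | cons line rest ih =>
    simp only [scanLinesA, List.any_cons]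
    cases h : line.all (fun n => market.contains n) <;> simp [h, ih]

lemma getElem?_appendRowA (cols : List (List Int)) (row : List Int)
    (h : row.length ≤ cols.length) (j : Nat) :
    (appendRowA cols row)[j]? = cols[j]?.map (fun c => c ++ row[j]?.toList) := by
  induction cols generalizing row j with
  | nil =>
    simp at h
    subst h
    simp [appendRowA]
  | cons c cs ih =>
    cases row with
    | nil => simp [appendRowA]
    | cons n ns =>
      cases j with
      | zero => simp [appendRowA]
      | succ j =>
        simp only [appendRowA, List.getElem?_cons_succ]
        exact ih ns (by simpa using h) j

lemma length_appendRowA (cols : List (List Int)) (row : List Int) (h : row.length ≤ cols.length) :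
    (appendRowA cols row).length = cols.length := by
  induction cols generalizing row with
  | nil => simp at h; subst h; rfl
  | cons c cs ih =>
    cases row with
    | nil => rfl
    | cons n ns => simp only [appendRowA, List.length_cons]; rw [ih ns (by simpa using h)]

lemma foldl_appendRowA (bs : List (List Int)) (cols : List (List Int))
    (h : ∀ r ∈ bs, r.length ≤ cols.length) :
    (bs.foldl appendRowA cols).length = cols.length ∧
    ∀ j : Nat, (bs.foldl appendRowA cols)[j]? =
      cols[j]?.map (fun c => c ++ bs.filterMap (fun r => r[j]?)) := by
  induction bs generalizing cols with
  | nil => simp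
  | cons r bs ih =>
    have hr : r.length ≤ cols.length := h r (List.mem_cons_self)
    have h' : ∀ r' ∈ bs, r'.length ≤ (appendRowA cols r).length := by
      rw [length_appendRowA cols r hr]
      exact fun r' hr' => h r' (List.mem_cons_of_mem _ hr')
    obtain ⟨hl, hg⟩ := ih (appendRowA cols r) h'
    simp only [List.foldl_cons]
    refine ⟨by rw [hl, length_appendRowA cols r hr], fun j => ?_⟩
    rw [hg j, getElem?_appendRowA cols r hr j]
    cases hc : cols[j]? <;> cases hn : r[j]? <;>
      simp [List.filterMap_cons, hn, List.append_assoc]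

lemma buildCols_eq (board : List (List Int)) (h : goodB board) :
    board.foldl appendRowA (List.replicate (board.headD []).length []) = colsOf board := by
  apply List.ext_getElem?
  intro j
  obtain ⟨hl, hg⟩ := foldl_appendRowA board (List.replicate (board.headD []).length [])
    (by intro r hr; rw [List.length_replicate]; exact h.2 r hr)
  rw [hg j]
  unfold colsOf
  rw [List.getElem?_replicate]
  by_cases hj : j < (board.headD []).length
  · rw [if_pos hj]
    have hj' : j < (board.head?.getD []).length := by
      simpa [List.headD_eq_head?_getD] using hj
    simp [List.getElem?_map, List.getElem?_range, hj']
  · rw [if_neg hj]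
    simp only [Option.map_none]
    symm
    rw [List.getElem?_eq_none_iff]
    simpa using hj

lemma line_complete_iff (numbers : List Int) (line : List Int) (t : Nat) (ht : t < numbers.length) :
    line.all (fun n => (numbers.take (t+1)).contains n) = true ↔ lineT numbers line ≤ (t : Int) := by
  rw [lineT_le_iff numbers line t (by omega), List.all_eq_true]
  apply forall_congr'
  intro n
  apply imp_congr_right
  intro _
  rw [List.contains_iff_mem, mem_take_iff_fIdx numbers n (t+1) (by omega)]
  omega

lemma winCond_iff (numbers : List Int) (board : List (List Int)) (t : Nat)
    (ht : t < numbers.length) (h : goodB board) :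
    (((scanLinesA board (numbers.take (t+1)) 0).2.isSome
      || (checkColsA board (numbers.take (t+1))).2.isSome) = true)
    ↔ wtOf numbers board ≤ (t : Int) := by
  unfold checkColsA
  rw [buildCols_eq board h]
  simp only [scanLines_isSome, ← List.any_append]
  rw [List.any_eq_true]
  rw [wt_le_iff numbers board t (by exact_mod_cast ht)]
  apply exists_congr
  intro l
  rw [and_congr_right_iff]
  intro _
  exact line_complete_iff numbers l t ht

lemma getUnmarketA_eq (board : List (List Int)) (market : List Int) :
    getUnmarketA board market = (board.flatMap id).filter (fun n => !(market.contains n)) := by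
  unfold getUnmarketA
  rw [List.filter_flatMap]
  rw [PySem.List.foldl_congr_mem board _
    (fun acc row => acc ++ row.filter (fun n => !(market.contains n))) []
    (by
      intro acc row _
      rw [show (fun (acc : List Int) n => if market.contains n then acc else acc ++ [n])
          = (fun acc n => if (!(market.contains n)) = true then acc ++ [n] else acc) from
        funext fun acc => funext fun n => by cases hc : market.contains n <;> simp [hc]]
      exact PySem.List.foldl_append_if_eq_filter _ row acc)]
  rw [PySem.List.foldl_append_eq_flatMap]
  simp

lemma scoreA_eq (numbers : List Int) (board : List (List Int)) (t : Nat) (ht : t < numbers.length)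
    (hreg : regOf numbers board = (t : Int)) :
    (getUnmarketA board (numbers.take (t+1))).sum * numbers.getD t 0 = scoreOf numbers board := by
  rw [getUnmarketA_eq, scoreOf, hreg]
  rw [List.filter_congr (fun n _ => ?_)]
  · rw [Int.toNat_natCast]
  · rw [show (!(numbers.take (t+1)).contains n) = decide ((t : Int) < (fIdx numbers n : Int)) from ?_]
    cases hc : (numbers.take (t+1)).contains n
    · rw [List.contains_eq_mem] at hc
      have := (mem_take_iff_fIdx numbers n (t+1) (by omega)).not.mp (by simpa using hc)
      simp only [Bool.not_false]
      symm
      simpa using by omega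
    · rw [List.contains_eq_mem] at hc
      have := (mem_take_iff_fIdx numbers n (t+1) (by omega)).mp (by simpa using hc)
      simp only [Bool.not_true]
      symm
      simpa using by omega

lemma newly_wins_iff (numbers : List Int) (board : List (List Int)) (t : Nat)
    (ht : t < numbers.length)
    (hnot : ¬ (wtOf numbers board < (numbers.length : Int) ∧ regOf numbers board < (t : Int))) :
    (wtOf numbers board ≤ (t : Int)
    ↔ (wtOf numbers board < (numbers.length : Int) ∧ regOf numbers board = (t : Int))) := by
  unfold regOf at *
  have hN : (t : Int) < (numbers.length : Int) := by exact_mod_cast ht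
  rcases le_total (wtOf numbers board) 0 with h0 | h0
  · rw [max_eq_right h0] at *
    constructor
    · intro hle
      refine ⟨by omega, ?_⟩
      by_contra hne
      exact hnot ⟨by omega, by omega⟩
    · rintro ⟨_, h2⟩; omega
  · rw [max_eq_left h0] at *
    constructor
    · intro hle
      refine ⟨by omega, ?_⟩
      by_contra hne
      exact hnot ⟨by omega, by omega⟩
    · rintro ⟨_, h2⟩; omega

lemma innerFold_spec (numbers : List Int) (t : Nat) (ht : t < numbers.length)
    (E : List (Int × List (List Int))) (W : List Int) (R : List (List (String × Int)))
    (hgood : ∀ p ∈ E, goodB p.2)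
    (hW : ∀ p ∈ E, (W.contains p.1 = true ↔
      (wtOf numbers p.2 < (numbers.length : Int) ∧ regOf numbers p.2 < (t : Int))))
    (hnd : (E.map Prod.fst).Nodup) :
    (E.foldl (stepBoardA (numbers.take (t+1)) (numbers.getD t 0)) (W, R)).2
      = R ++ (E.filter (fun ib => decide (wtOf numbers ib.2 < (numbers.length : Int) ∧
          regOf numbers ib.2 = (t : Int)))).map (fun ib => entryOf numbers ib.1 ib.2)
    ∧ ∀ i' : Int, (E.foldl (stepBoardA (numbers.take (t+1)) (numbers.getD t 0)) (W, R)).1.contains i'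
      = (W.contains i' || E.any (fun ib => ib.1 == i' && decide (wtOf numbers ib.2 < (numbers.length : Int) ∧
          regOf numbers ib.2 = (t : Int)))) := by
  induction E generalizing W R with
  | nil => simp
  | cons p E ih =>
    have hgp : goodB p.2 := hgood p List.mem_cons_self
    have hWp := hW p List.mem_cons_self
    have hndE : (E.map Prod.fst).Nodup := (List.nodup_cons.mp hnd).2
    have hpE : p.1 ∉ E.map Prod.fst := (List.nodup_cons.mp hnd).1
    simp only [List.foldl_cons]
    by_cases hc : W.contains p.1
    · -- already a winner: skipped, and its registered draw is < t so it is not in this draw's group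
      have hlt := hWp.mp hc
      have hpredF : decide (wtOf numbers p.2 < (numbers.length : Int) ∧
          regOf numbers p.2 = (t : Int)) = false := by
        simp only [decide_eq_false_iff_not]
        rintro ⟨_, h2⟩
        omega
      rw [show stepBoardA (numbers.take (t+1)) (numbers.getD t 0) (W, R) p = (W, R) from by
        unfold stepBoardA; rw [if_pos hc]]
      obtain ⟨h1, h2⟩ := ih W R (fun q hq => hgood q (List.mem_cons_of_mem _ hq))
        (fun q hq => hW q (List.mem_cons_of_mem _ hq)) hndE
      refine ⟨?_, fun i' => ?_⟩
      · rw [h1, List.filter_cons_of_neg (by simp [hpredF])]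
      · rw [h2 i', List.any_cons, hpredF]
        simp
    · have hc' : W.contains p.1 = false := by simpa using hc
      have hnot := hWp.not.mp hc
      have hwin := (winCond_iff numbers p.2 t ht hgp).trans (newly_wins_iff numbers p.2 t ht (by simpa using hnot))
      by_cases hw : ((scanLinesA p.2 (numbers.take (t+1)) 0).2.isSome
          || (checkColsA p.2 (numbers.take (t+1))).2.isSome) = true
      · -- newly wins at draw t
        have hregt := hwin.mp hw
        have hpredT : decide (wtOf numbers p.2 < (numbers.length : Int) ∧
            regOf numbers p.2 = (t : Int)) = true := by simpa using hregt
        rw [show stepBoardA (numbers.take (t+1)) (numbers.getD t 0) (W, R) p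
            = (W ++ [p.1], R ++ [entryOf numbers p.1 p.2]) from by
          unfold stepBoardA
          rw [if_neg (by rw [hc']; exact Bool.false_ne_true), if_pos hw]
          rw [scoreA_eq numbers p.2 t ht hregt.2]
          rfl]
        obtain ⟨h1, h2⟩ := ih (W ++ [p.1]) (R ++ [entryOf numbers p.1 p.2])
          (fun q hq => hgood q (List.mem_cons_of_mem _ hq))
          (fun q hq => by
            rw [List.contains_append]
            have hqp : ([p.1].contains q.1) = false := by
              simp only [List.contains_cons, List.contains_nil, Bool.or_false, beq_eq_false_iff_ne, ne_eq]
              intro hqe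
              exact hpE (hqe ▸ List.mem_map_of_mem (f := Prod.fst) hq)
            rw [hqp, Bool.or_false]
            exact hW q (List.mem_cons_of_mem _ hq)) hndE
        refine ⟨?_, fun i' => ?_⟩
        · rw [h1, List.filter_cons_of_pos (by simp [hpredT]), List.map_cons, List.append_assoc]
          rfl
        · rw [h2 i', List.any_cons, hpredT, List.contains_append]
          simp only [List.contains_cons, List.contains_nil, Bool.or_false, Bool.and_true]
          rw [show (p.1 == i') = (i' == p.1) from by
            cases h : (p.1 == i') <;> cases h2 : (i' == p.1) <;> simp_all <;> omega]
          simp [Bool.or_assoc]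
      · -- does not win at draw t
        have hnreg : decide (wtOf numbers p.2 < (numbers.length : Int) ∧
            regOf numbers p.2 = (t : Int)) = false := by
          simp only [decide_eq_false_iff_not]
          exact fun hcon => hw (hwin.mpr hcon)
        rw [show stepBoardA (numbers.take (t+1)) (numbers.getD t 0) (W, R) p = (W, R) from by
          unfold stepBoardA
          rw [if_neg (by rw [hc']; exact Bool.false_ne_true), if_neg (by simpa using hw)]]
        obtain ⟨h1, h2⟩ := ih W R (fun q hq => hgood q (List.mem_cons_of_mem _ hq))
          (fun q hq => hW q (List.mem_cons_of_mem _ hq)) hndE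
        refine ⟨?_, fun i' => ?_⟩
        · rw [h1, List.filter_cons_of_neg (by simp [hnreg])]
        · rw [h2 i', List.any_cons, hnreg]
          simp

lemma any_key_eq (E : List (Int × List (List Int))) (hnd : (E.map Prod.fst).Nodup)
    (p : Int × List (List Int)) (hp : p ∈ E) (d : (Int × List (List Int)) → Bool) :
    E.any (fun ib => ib.1 == p.1 && d ib) = d p := by
  induction E with
  | nil => cases hp
  | cons q E ih =>
    have hndE := (List.nodup_cons.mp hnd).2
    have hqE := (List.nodup_cons.mp hnd).1
    rcases List.mem_cons.mp hp with rfl | hp'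
    · simp only [List.any_cons, beq_self_eq_true, Bool.true_and]
      have : E.any (fun ib => ib.1 == p.1 && d ib) = false := by
        rw [List.any_eq_false]
        rintro ib hib
        have : ib.1 ≠ p.1 := fun he => hqE (he ▸ List.mem_map_of_mem (f := Prod.fst) hib)
        simp [this]
      rw [this, Bool.or_false]
    · have hqp : (q.1 == p.1) = false := by
        simp only [beq_eq_false_iff_ne, ne_eq]
        exact fun he => hqE (he ▸ List.mem_map_of_mem (f := Prod.fst) hp')
      simp only [List.any_cons, hqp, Bool.false_and, Bool.false_or]
      exact ih hndE hp'

lemma mainFold_spec (numbers : List Int) (boards : List (List (List Int)))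
    (hg : ∀ b ∈ boards, goodB b) (k : Nat) (hk : k ≤ numbers.length) :
    ((numbers.take k).foldl (stepDrawA boards) ([], [], [])).1 = numbers.take k
    ∧ ((numbers.take k).foldl (stepDrawA boards) ([], [], [])).2.2
        = (List.range k).flatMap (groupAt numbers boards)
    ∧ ∀ p ∈ PySem.List.enumerate boards 0,
        ((((numbers.take k).foldl (stepDrawA boards) ([], [], [])).2.1.contains p.1) = true ↔
          (wtOf numbers p.2 < (numbers.length : Int) ∧ regOf numbers p.2 < (k : Int))) := by
  induction k with
  | zero =>
    refine ⟨rfl, rfl, fun p hp => ?_⟩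
    simp only [List.take_zero, List.foldl_nil, List.contains_nil, Bool.false_eq_true, false_iff]
    rintro ⟨_, h2⟩
    have : (0:Int) ≤ regOf numbers p.2 := le_max_right _ _
    omega
  | succ k ih =>
    have hk' : k ≤ numbers.length := by omega
    have hkN : k < numbers.length := by omega
    obtain ⟨h1, h2, h3⟩ := ih hk'
    have htake : numbers.take (k+1) = numbers.take k ++ [numbers[k]] := by
      rw [List.take_succ, List.getElem?_eq_getElem hkN]
      rfl
    rw [htake, List.foldl_append, List.foldl_cons, List.foldl_nil]
    set st := (numbers.take k).foldl (stepDrawA boards) ([], [], []) with hst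
    have hmarket : st.1 ++ [numbers[k]] = numbers.take (k+1) := by rw [h1, ← htake]
    have hgetD : numbers[k] = numbers.getD k 0 := by rw [List.getD_eq_getElem _ _ hkN]
    have hgood : ∀ p ∈ PySem.List.enumerate boards 0, goodB p.2 := by
      intro p hp
      rcases (PySem.List.mem_enumerate_iff _ _ _).mp hp with ⟨j, hj, rfl⟩
      exact hg _ (List.getElem_mem hj)
    have hnd : ((PySem.List.enumerate boards 0).map Prod.fst).Nodup := by
      rw [PySem.List.map_fst_enumerate]
      exact PySem.List.nodup_pyRange_one _ _
    have hinner := innerFold_spec numbers k hkN (PySem.List.enumerate boards 0) st.2.1 st.2.2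
      hgood h3 hnd
    have hstep : stepDrawA boards st (numbers[k]) =
        (numbers.take (k+1),
         ((PySem.List.enumerate boards 0).foldl
           (stepBoardA (numbers.take (k+1)) (numbers.getD k 0)) (st.2.1, st.2.2)).1,
         ((PySem.List.enumerate boards 0).foldl
           (stepBoardA (numbers.take (k+1)) (numbers.getD k 0)) (st.2.1, st.2.2)).2) := by
      unfold stepDrawA
      rw [← hgetD, hmarket]
    rw [hstep]
    refine ⟨by rw [← htake], ?_, fun p hp => ?_⟩
    · show (List.foldl _ (st.2.1, st.2.2) _).2 = _
      rw [hinner.1, h2, List.range_succ, List.flatMap_append]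
      simp [groupAt]
    · show (List.foldl _ (st.2.1, st.2.2) _).1.contains p.1 = true ↔ _
      rw [hinner.2 p.1, any_key_eq _ hnd p hp]
      rw [Bool.or_eq_true, h3 p hp, decide_eq_true_iff]
      have h0 : (0:Int) ≤ regOf numbers p.2 := le_max_right _ _
      constructor
      · rintro (⟨ha, hb⟩ | ⟨ha, hb⟩) <;> exact ⟨ha, by push_cast; omega⟩
      · rintro ⟨ha, hb⟩
        by_cases hlt : regOf numbers p.2 < (k:Int)
        · exact Or.inl ⟨ha, hlt⟩
        · right
          refine ⟨ha, ?_⟩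
          push_cast at hb ⊢
          omega

lemma a_eq_flat (numbers : List Int) (boards : List (List (List Int)))
    (hg : ∀ b ∈ boards, goodB b) :
    trunkated_bingo_game numbers boards
      = (List.range numbers.length).flatMap (groupAt numbers boards) := by
  have h := (mainFold_spec numbers boards hg numbers.length le_rfl).2.1
  rw [List.take_length] at h
  exact h

lemma stepBoardB_eq (numbers : List Int) (bks : List (List (List (String × Int))))
    (ib : Int × List (List Int)) (hgood : goodB ib.2) (hne : numbers ≠ []) :
    stepBoardB numbers (firstIdxB numbers) bks ib =
      if wtOf numbers ib.2 < (numbers.length : Int) then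
        PySem.List.pySetD bks (regOf numbers ib.2)
          ((PySem.List.pyGetD bks (regOf numbers ib.2) []) ++ [entryOf numbers ib.1 ib.2])
      else bks := by
  unfold stepBoardB
  simp only [first_getD]
  have hwt : (ib.2 ++ colsOf ib.2).foldl
      (fun m line => min m (line.foldl (fun mx n => max mx ((fIdx numbers n : Int))) (-1)))
      (numbers.length : Int) = wtOf numbers ib.2 := rfl
  rw [buildCols_eq ib.2 hgood]
  rw [hwt]
  split_ifs with h
  · have hN : (0:Int) < numbers.length := by
      cases numbers with
      | nil => exact absurd rfl hne
      | cons a l => simp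
    have h0 : (0:Int) ≤ max (wtOf numbers ib.2) 0 := le_max_right _ _
    have hlt : max (wtOf numbers ib.2) 0 < (numbers.length : Int) := by
      rcases le_total (wtOf numbers ib.2) 0 with h'|h'
      · rw [max_eq_right h']; exact hN
      · rw [max_eq_left h']; exact h
    have : PySem.List.pyGetD numbers (max (wtOf numbers ib.2) 0) 0
        = numbers.getD (max (wtOf numbers ib.2) 0).toNat 0 := by
      rw [PySem.List.pyGetD_eq_getElem numbers 0 h0 hlt,
        List.getD_eq_getElem numbers 0 (by omega)]
    rw [this]
    simp only [regOf, entryOf, scoreOf]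
    rfl
  · rfl

lemma bFold_spec (numbers : List Int) (hne : numbers ≠ []) (E : List (Int × List (List Int)))
    (hgood : ∀ p ∈ E, goodB p.2)
    (bks : List (List (List (String × Int)))) (hlen : bks.length = numbers.length) :
    (E.foldl (stepBoardB numbers (firstIdxB numbers)) bks).length = numbers.length ∧
    ∀ t : Nat, t < numbers.length →
      (E.foldl (stepBoardB numbers (firstIdxB numbers)) bks)[t]? =
        some ((bks[t]?.getD []) ++ ((E.filter (fun ib => decide (wtOf numbers ib.2 < (numbers.length : Int) ∧
          regOf numbers ib.2 = (t : Int)))).map (fun ib => entryOf numbers ib.1 ib.2))) := by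
  induction E generalizing bks with
  | nil =>
    simp only [List.foldl_nil, List.filter_nil, List.map_nil, List.append_nil]
    refine ⟨hlen, fun t ht => ?_⟩
    rw [List.getElem?_eq_getElem (show t < bks.length by omega)]
    simp
  | cons p E ih =>
    have hgp : goodB p.2 := hgood p List.mem_cons_self
    have hgE : ∀ q ∈ E, goodB q.2 := fun q hq => hgood q (List.mem_cons_of_mem _ hq)
    simp only [List.foldl_cons]
    rw [stepBoardB_eq numbers bks p hgp hne]
    by_cases hok : wtOf numbers p.2 < (numbers.length : Int)
    · rw [if_pos hok]
      have h0 : (0:Int) ≤ regOf numbers p.2 := le_max_right _ _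
      have hN : (0:Int) < numbers.length := by
        cases numbers with
        | nil => exact absurd rfl hne
        | cons a l => simp
      have hlt : regOf numbers p.2 < (numbers.length : Int) := by
        unfold regOf
        rcases le_total (wtOf numbers p.2) 0 with h'|h'
        · rw [max_eq_right h']; exact hN
        · rw [max_eq_left h']; exact hok
      set rn : Nat := (regOf numbers p.2).toNat with hrn
      have hrlt : rn < bks.length := by rw [hlen]; omega
      have hset : PySem.List.pySetD bks (regOf numbers p.2)
          ((PySem.List.pyGetD bks (regOf numbers p.2) []) ++ [entryOf numbers p.1 p.2])
          = bks.set rn (bks[rn] ++ [entryOf numbers p.1 p.2]) := by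
        rw [PySem.List.pySetD_of_nonneg bks _ h0,
          PySem.List.pyGetD_eq_getElem bks [] h0 (by rw [hlen]; exact hlt)]
      rw [hset]
      obtain ⟨hl, hg⟩ := ih hgE (bks.set rn (bks[rn] ++ [entryOf numbers p.1 p.2])) (by simp [hlen])
      refine ⟨hl, fun t ht => ?_⟩
      rw [hg t ht]
      by_cases hteq : t = rn
      · subst hteq
        rw [List.filter_cons_of_pos (by simp; constructor; exact hok; omega)]
        rw [List.getElem?_set_self', List.getElem?_eq_getElem hrlt]
        simp [List.append_assoc]
      · rw [List.filter_cons_of_neg (by simp; intro _; omega)]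
        rw [List.getElem?_set_ne (by omega)]
    · rw [if_neg hok]
      obtain ⟨hl, hg⟩ := ih hgE bks hlen
      refine ⟨hl, fun t ht => ?_⟩
      rw [hg t ht, List.filter_cons_of_neg (by simp; intro h1; exact absurd h1 hok)]

lemma b_eq_flat (numbers : List Int) (boards : List (List (List Int)))
    (hne : numbers ≠ []) (hgb : ∀ b ∈ boards, goodB b) :
    trunkated_bingo_game_alt numbers boards
      = (List.range numbers.length).flatMap (groupAt numbers boards) := by
  · have hgood : ∀ p ∈ PySem.List.enumerate boards 0, goodB p.2 := by
      intro p hp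
      rcases (PySem.List.mem_enumerate_iff _ _ _).mp hp with ⟨j, hj, rfl⟩
      exact hgb _ (List.getElem_mem hj)
    unfold trunkated_bingo_game_alt
    rw [if_neg hne]
    change ((PySem.List.enumerate boards 0).foldl (stepBoardB numbers (firstIdxB numbers))
        (numbers.map (fun _ => []))).flatten = _
    obtain ⟨hl, hg⟩ := bFold_spec numbers hne (PySem.List.enumerate boards 0) hgood
      (numbers.map (fun _ => [])) (by simp)
    have hbk : (PySem.List.enumerate boards 0).foldl (stepBoardB numbers (firstIdxB numbers))
        (numbers.map (fun _ => []))
        = (List.range numbers.length).map (fun t => groupAt numbers boards t) := by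
      apply List.ext_getElem?
      intro j
      by_cases hj : j < numbers.length
      · rw [hg j hj]
        simp [List.getElem?_map, List.getElem?_range, hj,
          List.getElem?_eq_getElem (show j < numbers.length from hj), groupAt]
      · rw [List.getElem?_eq_none_iff.mpr (by rw [hl]; omega),
          List.getElem?_eq_none_iff.mpr (by simp; omega)]
    rw [hbk]
    rw [List.flatMap_def]

-- ===== VERDICT (by name: the statement is the Claim_ definition above) =====
theorem trunkated_bingo_game_spec : Claim_equal_trunkated_bingo_game := by
  intro numbers boards _ hpre
  unfold Spec_trunkated_bingo_game
  by_cases hne : numbers = []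
  · subst hne
    rfl
  · rcases hpre with h0 | hg
    · exact absurd h0 hne
    · rw [a_eq_flat numbers boards hg, b_eq_flat numbers boards hne hg]
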